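-- pv_equiv track=rewrite | github.com/sarna320/scalp | src/scalpel/sell_planner.py | max_gross_alpha_for_net_limit
-- ===== SOURCE A (Python) =====
-- PPM_DEN = 1_000_000
--
-- ALPHA_FEE_PPM = 500
--
-- def ceil_div(a: int, b: int) -> int:
--     """Ceiling division for integers."""
--     if b <= 0:
--         raise ValueError("b must be > 0")
--     return (a + b - 1) // b
--
-- def alpha_fee_rao(alpha_gross_rao: int, fee_ppm: int = ALPHA_FEE_PPM) -> int:
--     """Alpha fee in rao (rounded up, conservative)."""
--     if alpha_gross_rao <= 0:
--         return 0
--     return ceil_div(alpha_gross_rao * fee_ppm, PPM_DEN)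
--
-- def net_alpha_into_pool_rao(alpha_gross_rao: int) -> int:
--     """Net alpha that reaches the pool after alpha-fee."""
--     return max(0, alpha_gross_rao - alpha_fee_rao(alpha_gross_rao))
--
-- def max_gross_alpha_for_net_limit(net_limit_rao: int) -> int:
--     """
--     Max gross alpha such that net_alpha_into_pool_rao(gross) <= net_limit_rao.
--     Uses a tight integer conversion to handle fee rounding.
--     """
--     if net_limit_rao <= 0:
--         return 0
--
--     denom = PPM_DEN - ALPHA_FEE_PPM
--
--     # Approximate start (floor)
--     gross = (net_limit_rao * PPM_DEN) // denom
--
--     # Nudge upward while still valid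
--     while True:
--         cand = gross + 1
--         if net_alpha_into_pool_rao(cand) <= net_limit_rao:
--             gross = cand
--             continue
--         break
--
--     while gross > 0 and net_alpha_into_pool_rao(gross) > net_limit_rao:
--         gross -= 1
--
--     return gross
-- ===== SOURCE B (Python) =====
-- PPM_DEN = 1_000_000
--
-- ALPHA_FEE_PPM = 500
--
-- def max_gross_alpha_for_net_limit(net_limit_rao: int) -> int:
--     """Closed form: net(g) = floor(g*(PPM_DEN-ALPHA_FEE_PPM)/PPM_DEN) for g >= 1,
--     so the largest gross with net(gross) <= limit is
--     floor(((limit+1)*PPM_DEN - 1) / (PPM_DEN - ALPHA_FEE_PPM))."""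
--     if net_limit_rao <= 0:
--         return 0
--     return ((net_limit_rao + 1) * PPM_DEN - 1) // (PPM_DEN - ALPHA_FEE_PPM)
-- ===== Notes on version B (the rewrite author's own statement) =====
-- stated objective: simpler
-- what changed: Replaced A's floor-approximation plus two correction loops (nudge up while valid, then walk down while invalid) by a single closed-form expression ((limit+1)*PPM_DEN - 1) // (PPM_DEN - ALPHA_FEE_PPM), derived from net(g) = floor(g*(PPM_DEN-FEE)/PPM_DEN).
import Mathlib
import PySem

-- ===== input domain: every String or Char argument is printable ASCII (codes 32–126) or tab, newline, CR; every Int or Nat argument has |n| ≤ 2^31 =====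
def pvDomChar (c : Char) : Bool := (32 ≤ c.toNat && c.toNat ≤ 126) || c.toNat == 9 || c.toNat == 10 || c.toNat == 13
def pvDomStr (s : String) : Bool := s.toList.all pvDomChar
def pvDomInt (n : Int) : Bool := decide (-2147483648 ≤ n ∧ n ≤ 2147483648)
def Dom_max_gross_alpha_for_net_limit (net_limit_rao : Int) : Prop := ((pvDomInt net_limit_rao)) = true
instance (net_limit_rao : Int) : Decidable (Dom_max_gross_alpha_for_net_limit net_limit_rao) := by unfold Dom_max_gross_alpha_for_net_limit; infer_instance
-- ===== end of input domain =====

-- B replaces A's two correction loops by the closed-form largest gross ((L+1)*PPM_DEN - 1) // (PPM_DEN - ALPHA_FEE_PPM); objective: simpler.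

-- ===== PORT A =====
def pvPPM_DEN : Int := 1000000
def pvALPHA_FEE_PPM : Int := 500

-- ceil_div(a, b); in A it is only ever called with b = PPM_DEN > 0, so the b ≤ 0 raise branch is unreachable
def pv_ceil_div (a b : Int) : Int := PySem.Int.floordiv (a + b - 1) b

def pv_alpha_fee_rao (alpha_gross_rao : Int) (fee_ppm : Int) : Int :=
  if alpha_gross_rao ≤ 0 then 0 else pv_ceil_div (alpha_gross_rao * fee_ppm) pvPPM_DEN

def pv_net_alpha_into_pool_rao (alpha_gross_rao : Int) : Int :=
  max 0 (alpha_gross_rao - pv_alpha_fee_rao alpha_gross_rao pvALPHA_FEE_PPM)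

-- proof-side bound used only as a termination measure for A's first while-loop
def pvUpperBound (L : Int) : Int := PySem.Int.floordiv ((L + 1) * 1000000 - 1) 999500

-- A's first loop: "while True: cand = gross + 1; if net(cand) <= limit: gross = cand; continue; break"
-- (fuel makes the recursion structural; pvUpperBound-based fuel is proved sufficient below)
def pv_upLoop : Nat → Int → Int → Int
  | 0, _, gross => gross
  | n + 1, L, gross =>
    if pv_net_alpha_into_pool_rao (gross + 1) ≤ L then pv_upLoop n L (gross + 1) else gross

-- A's second loop: "while gross > 0 and net(gross) > limit: gross -= 1"
def pv_downLoop : Nat → Int → Int → Int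
  | 0, _, gross => gross
  | n + 1, L, gross =>
    if 0 < gross ∧ L < pv_net_alpha_into_pool_rao gross then pv_downLoop n L (gross - 1) else gross

def max_gross_alpha_for_net_limit (net_limit_rao : Int) : Int :=
  if net_limit_rao ≤ 0 then 0
  else
    let denom := pvPPM_DEN - pvALPHA_FEE_PPM
    let gross := PySem.Int.floordiv (net_limit_rao * pvPPM_DEN) denom
    let g1 := pv_upLoop ((pvUpperBound net_limit_rao - gross).toNat + 1) net_limit_rao gross
    pv_downLoop (g1.toNat + 1) net_limit_rao g1

-- ===== PORT B =====
def max_gross_alpha_for_net_limit_alt (net_limit_rao : Int) : Int :=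
  if net_limit_rao ≤ 0 then 0
  else PySem.Int.floordiv ((net_limit_rao + 1) * 1000000 - 1) (1000000 - 500)

-- ===== PRECONDITION & SPEC =====
def Spec_max_gross_alpha_for_net_limit (net_limit_rao : Int) (out : Int) : Prop := out = max_gross_alpha_for_net_limit_alt net_limit_rao
instance (net_limit_rao : Int) (out : Int) : Decidable (Spec_max_gross_alpha_for_net_limit net_limit_rao out) := by unfold Spec_max_gross_alpha_for_net_limit; infer_instance

-- ===== CLAIM (what is proved, stated in full; the proofs are below) =====
def Claim_equal_max_gross_alpha_for_net_limit : Prop := ∀ (net_limit_rao : Int), Dom_max_gross_alpha_for_net_limit net_limit_rao → Spec_max_gross_alpha_for_net_limit net_limit_rao (max_gross_alpha_for_net_limit net_limit_rao)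

-- ===== LEMMAS AND PROOFS =====

theorem pvUpperBound_char (L : Int) :
    pvUpperBound L * 999500 ≤ (L + 1) * 1000000 - 1 ∧
    (L + 1) * 1000000 - 1 < (pvUpperBound L + 1) * 999500 := by
  have h : PySem.Int.floordiv ((L + 1) * 1000000 - 1) 999500 = pvUpperBound L := rfl
  exact (PySem.Int.floordiv_eq_iff_of_pos (by norm_num)).mp h

theorem pv_valid_iff (L c : Int) (hc : 1 ≤ c) :
    pv_net_alpha_into_pool_rao c ≤ L ↔ c ≤ pvUpperBound L := by
  have hb := pvUpperBound_char L
  unfold pv_net_alpha_into_pool_rao pv_alpha_fee_rao pv_ceil_div pvPPM_DEN pvALPHA_FEE_PPM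
  rw [if_neg (by omega), PySem.Int.floordiv_eq_ediv_of_pos (by norm_num)]
  omega

theorem pv_net_nonneg (c : Int) : 0 ≤ pv_net_alpha_into_pool_rao c := le_max_left _ _

theorem pv_up_step (L g : Int) (h : pv_net_alpha_into_pool_rao (g + 1) ≤ L) :
    g < pvUpperBound L := by
  have hb := pvUpperBound_char L
  rcases le_or_gt (g + 1) 0 with h0 | h0
  · have hL : 0 ≤ L := le_trans (pv_net_nonneg _) h
    omega
  · have := (pv_valid_iff L (g + 1) (by omega)).mp h
    omega


theorem pv_upLoop_eq (L : Int) (n : Nat) :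
    ∀ g : Int, 0 ≤ g → g ≤ pvUpperBound L → (pvUpperBound L - g).toNat < n →
      pv_upLoop n L g = pvUpperBound L := by
  induction n with
  | zero => intro g _ _ hn; omega
  | succ n ih =>
    intro g hg0 hle hn
    rcases eq_or_lt_of_le hle with hg | hlt
    · rw [pv_upLoop, if_neg]
      · exact hg
      · intro h
        have := pv_up_step L g h
        omega
    · have hvalid : pv_net_alpha_into_pool_rao (g + 1) ≤ L :=
        (pv_valid_iff L (g + 1) (by omega)).mpr (by omega)
      rw [pv_upLoop, if_pos hvalid]
      exact ih (g + 1) (by omega) (by omega) (by omega)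

theorem pv_downLoop_stop (n : Nat) (L g : Int) (h : pv_net_alpha_into_pool_rao g ≤ L) :
    pv_downLoop (n + 1) L g = g := by
  rw [pv_downLoop, if_neg]
  omega

theorem max_gross_alpha_for_net_limit_spec : Claim_equal_max_gross_alpha_for_net_limit := by
  intro L _
  unfold Spec_max_gross_alpha_for_net_limit max_gross_alpha_for_net_limit
    max_gross_alpha_for_net_limit_alt
  by_cases hL : L ≤ 0
  · simp [hL]
  · have hL1 : 1 ≤ L := by omega
    simp only [if_neg hL]
    have hb := pvUpperBound_char L
    -- the starting gross
    set g0 : Int := PySem.Int.floordiv (L * pvPPM_DEN) (pvPPM_DEN - pvALPHA_FEE_PPM) with hg0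
    have hg0c : g0 * 999500 ≤ L * 1000000 ∧ L * 1000000 < (g0 + 1) * 999500 := by
      have h : PySem.Int.floordiv (L * pvPPM_DEN) (pvPPM_DEN - pvALPHA_FEE_PPM) = g0 := hg0.symm
      unfold pvPPM_DEN pvALPHA_FEE_PPM at h
      have := (PySem.Int.floordiv_eq_iff_of_pos (a := L * 1000000) (b := 999500) (by norm_num)).mp (by exact_mod_cast h)
      omega
    have hg00 : 0 ≤ g0 := by omega
    have hg0le : g0 ≤ pvUpperBound L := by omega
    have hup : pv_upLoop ((pvUpperBound L - g0).toNat + 1) L g0 = pvUpperBound L :=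
      pv_upLoop_eq L _ g0 hg00 hg0le (by omega)
    have hB1 : 1 ≤ pvUpperBound L := by omega
    have hdown : ∀ n : Nat, pv_downLoop (n + 1) L (pvUpperBound L) = pvUpperBound L :=
      fun n => pv_downLoop_stop n L _ ((pv_valid_iff L _ hB1).mpr le_rfl)
    rw [hup, hdown]
    unfold pvUpperBound
    norm_num
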